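-- pv_equiv track=rewrite | github.com/BobbyC100/Pocket_Pallet | PP_MVP/backend/import_merchants_from_csv.py | categorize_merchant
-- ===== SOURCE A (Python) =====
-- def categorize_merchant(title, note):
--     """Determine merchant type based on name/note"""
--     combined = f"{title} {note}".lower()
--
--     if 'wine' in combined:
--         if any(x in combined for x in ['shop', 'store', 'merchant', 'spirits', 'liquor']):
--             return 'wine_shop'
--         else:
--             return 'wine_bar'
--     elif any(x in combined for x in ['coffee', 'cafe']) and 'wine' not in combined:
--         return 'cafe'
--     elif any(x in combined for x in ['bakery', 'deli', 'patisserie']):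
--         return 'bakery'
--     elif 'brew' in combined:
--         return 'brewery'
--     elif any(x in combined for x in ['bar', 'pub', 'tavern']):
--         return 'bar'
--     elif any(x in combined for x in ['bistro', 'brasserie', 'trattoria']):
--         return 'bistro'
--     else:
--         return 'restaurant'
-- ===== SOURCE B (Python) =====
-- KEYWORD_RANK = {
--     'wine': 0,
--     'coffee': 1, 'cafe': 1,
--     'bakery': 2, 'deli': 2, 'patisserie': 2,
--     'brew': 3,
--     'bar': 4, 'pub': 4, 'tavern': 4,
--     'bistro': 5, 'brasserie': 5, 'trattoria': 5,
-- }
--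
-- SHOP_WORDS = ('shop', 'store', 'merchant', 'spirits', 'liquor')
--
-- CATEGORIES = ('cafe', 'bakery', 'brewery', 'bar', 'bistro', 'restaurant')
--
--
-- def categorize_merchant(title, note):
--     """Determine merchant type based on name/note.
--
--     Single left-to-right scan over the combined text: at every position we
--     test which ranked keywords start there and keep the minimum rank seen
--     (lower rank = higher priority), plus a flag for shop-like words.
--     """
--     combined = (title + ' ' + note).lower()
--     best = 6  # sentinel: no keyword seen
--     shoppy = False
--     for i in range(len(combined)):
--         for kw, rank in KEYWORD_RANK.items():
--             if rank < best and combined.startswith(kw, i):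
--                 best = rank
--         shoppy = shoppy or any(combined.startswith(w, i) for w in SHOP_WORDS)
--     if best == 0:
--         return 'wine_shop' if shoppy else 'wine_bar'
--     return CATEGORIES[best - 1]
-- ===== Notes on version B (the rewrite author's own statement) =====
-- stated objective: alternative
-- what changed: Replaced A's ordered elif chain of whole-string substring-membership tests by a single left-to-right scan over the combined text that, at each position, records the minimum rank of any keyword starting there plus a shop-word flag, and maps the resulting best rank to its category at the end.
import Mathlib
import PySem

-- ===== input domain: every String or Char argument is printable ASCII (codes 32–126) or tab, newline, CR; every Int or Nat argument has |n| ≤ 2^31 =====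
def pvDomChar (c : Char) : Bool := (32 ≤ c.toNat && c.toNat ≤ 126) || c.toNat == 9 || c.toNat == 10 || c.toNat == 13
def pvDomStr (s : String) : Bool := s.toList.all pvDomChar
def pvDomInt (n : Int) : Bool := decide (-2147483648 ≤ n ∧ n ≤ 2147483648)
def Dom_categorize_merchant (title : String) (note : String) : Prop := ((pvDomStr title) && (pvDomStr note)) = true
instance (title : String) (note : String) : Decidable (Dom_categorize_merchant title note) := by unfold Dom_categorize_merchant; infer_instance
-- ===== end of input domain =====

-- B replaces A's ordered elif chain of substring-membership tests by a single left-to-right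
-- scan over the combined text, keeping the minimum rank of any keyword starting at each
-- position (alternative algorithm, same asymptotic cost).


-- ===== PORT A =====
-- literal transliteration of A's elif chain; strings handled on List Char (PySem.Chars is exact
-- on the ASCII domain); `x in combined` is PySem.Chars.isIn, `any(… for x in [...])` is List.any.
def categorize_merchant (title : String) (note : String) : String :=
  let combined : List Char := PySem.Chars.lower (title.toList ++ ' ' :: note.toList)
  if PySem.Chars.isIn "wine".toList combined then
    if ["shop", "store", "merchant", "spirits", "liquor"].any
        (fun x => PySem.Chars.isIn x.toList combined) then "wine_shop"
    else "wine_bar"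
  else if ["coffee", "cafe"].any (fun x => PySem.Chars.isIn x.toList combined)
          && !(PySem.Chars.isIn "wine".toList combined) then "cafe"
  else if ["bakery", "deli", "patisserie"].any (fun x => PySem.Chars.isIn x.toList combined) then "bakery"
  else if PySem.Chars.isIn "brew".toList combined then "brewery"
  else if ["bar", "pub", "tavern"].any (fun x => PySem.Chars.isIn x.toList combined) then "bar"
  else if ["bistro", "brasserie", "trattoria"].any (fun x => PySem.Chars.isIn x.toList combined) then "bistro"
  else "restaurant"

-- ===== PORT B =====
-- B's KEYWORD_RANK dict (insertion order) and SHOP_WORDS / CATEGORIES tuples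
def pvKeyRank : List (String × Nat) :=
  [("wine", 0), ("coffee", 1), ("cafe", 1), ("bakery", 2), ("deli", 2), ("patisserie", 2),
   ("brew", 3), ("bar", 4), ("pub", 4), ("tavern", 4), ("bistro", 5), ("brasserie", 5), ("trattoria", 5)]

def pvShopWords : List String := ["shop", "store", "merchant", "spirits", "liquor"]

def pvCategories : List String := ["cafe", "bakery", "brewery", "bar", "bistro", "restaurant"]

-- B's `for i in range(len(combined))` loop, carrying (best, shoppy); the suffix c :: cs is the
-- text from position i, so `combined.startswith(kw, i)` is exactly `Chars.startswith tail kw`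
def pvScan : List Char → Nat → Bool → Nat × Bool
  | [], best, shoppy => (best, shoppy)
  | c :: cs, best, shoppy =>
      let tail := c :: cs
      let best' := pvKeyRank.foldl
        (fun a p => if p.2 < a && PySem.Chars.startswith tail p.1.toList then p.2 else a) best
      let shoppy' := shoppy || pvShopWords.any (fun w => PySem.Chars.startswith tail w.toList)
      pvScan cs best' shoppy'

def categorize_merchant_alt (title : String) (note : String) : String :=
  let combined : List Char := PySem.Chars.lower (title.toList ++ ' ' :: note.toList)
  let r := pvScan combined 6 false
  if r.1 = 0 then (if r.2 then "wine_shop" else "wine_bar")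
  -- CATEGORIES[best - 1]: best is always in 1..6 here, so the index never goes out of range;
  -- getD's default is unreachable.
  else pvCategories.getD (r.1 - 1) "restaurant"

-- ===== PRECONDITION & SPEC =====
def Spec_categorize_merchant (title : String) (note : String) (out : String) : Prop := out = categorize_merchant_alt title note
instance (title : String) (note : String) (out : String) : Decidable (Spec_categorize_merchant title note out) := by unfold Spec_categorize_merchant; infer_instance

-- ===== CLAIM =====
def Claim_equal_categorize_merchant : Prop := ∀ (title : String) (note : String), Dom_categorize_merchant title note → Spec_categorize_merchant title note (categorize_merchant title note)

-- ===== LEMMAS AND PROOFS =====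

-- `sub in (c :: cs)` = it starts at the head, or occurs in the tail
theorem pvIsIn_cons (sub : List Char) (c : Char) (cs : List Char) :
    PySem.Chars.isIn sub (c :: cs)
      = (PySem.Chars.startswith (c :: cs) sub || PySem.Chars.isIn sub cs) := by
  rw [Bool.eq_iff_iff]
  simp [PySem.Chars.isIn_iff_infix, PySem.Chars.startswith_iff, List.infix_cons_iff]

theorem pvIsIn_nil (sub : List Char) :
    PySem.Chars.isIn sub [] = decide (sub = []) := by
  rw [Bool.eq_iff_iff]
  simp [PySem.Chars.isIn_iff_infix]

-- the branch-free form of B's inner-loop update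
theorem pvStep_eq (c : Bool) (r a : ℕ) :
    (if (decide (r < a) && c) = true then r else a) = (if c = true then min a r else a) := by
  cases c <;> (split_ifs <;> simp_all <;> omega)

theorem pvFoldl_min_min (f : String × Nat → Bool) :
    ∀ (KR : List (String × Nat)) (b r : ℕ),
      KR.foldl (fun a p => if f p then min a p.2 else a) (min b r)
        = min (KR.foldl (fun a p => if f p then min a p.2 else a) b) r := by
  intro KR
  induction KR with
  | nil => intro b r; rfl
  | cons x rest ih =>
      intro b r
      simp only [List.foldl_cons]
      cases hf : f x
      · simp [ih]
      · rw [if_pos rfl, if_pos rfl,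
          show min (min b r) x.2 = min (min b x.2) r by omega]
        exact ih (min b x.2) r

-- a fold over one rank group collapses to a single conditional min
theorem pvFold_group (l : List Char) (ks : List String) (r : ℕ) :
    ∀ (a : ℕ),
      (ks.map (fun k => (k, r))).foldl
          (fun acc x => if PySem.Chars.isIn x.1.toList l then min acc x.2 else acc) a
        = if ks.any (fun k => PySem.Chars.isIn k.toList l) then min a r else a := by
  induction ks with
  | nil => intro a; simp
  | cons k rest ih =>
      intro a
      simp only [List.map_cons, List.foldl_cons, List.any_cons]
      rw [ih]
      rcases Bool.eq_false_or_eq_true (PySem.Chars.isIn k.toList l) with h | h <;>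
        rcases Bool.eq_false_or_eq_true (rest.any (fun k => PySem.Chars.isIn k.toList l)) with h2 | h2 <;>
          simp [h, h2]

-- pvKeyRank, written as the concatenation of its rank groups
theorem pvKeyRank_groups :
    pvKeyRank = (["wine"].map (fun k => (k, 0)))
      ++ (["coffee", "cafe"].map (fun k => (k, 1)))
      ++ (["bakery", "deli", "patisserie"].map (fun k => (k, 2)))
      ++ (["brew"].map (fun k => (k, 3)))
      ++ (["bar", "pub", "tavern"].map (fun k => (k, 4)))
      ++ (["bistro", "brasserie", "trattoria"].map (fun k => (k, 5))) := rfl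

theorem pvFoldl_min_or (p q : String × Nat → Bool) :
    ∀ (KR : List (String × Nat)) (b : ℕ),
      KR.foldl (fun a x => if (p x || q x) then min a x.2 else a) b
        = KR.foldl (fun a x => if q x then min a x.2 else a)
            (KR.foldl (fun a x => if p x then min a x.2 else a) b) := by
  intro KR
  induction KR with
  | nil => intro b; rfl
  | cons x rest ih =>
      intro b
      simp only [List.foldl_cons]
      rw [ih]
      congr 1
      -- commute the q-step past the p-fold over rest
      cases hp : p x <;> cases hq : q x <;> simp_all [pvFoldl_min_min]

-- B's scan: the shop flag is exactly "some shop word occurs somewhere"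
theorem pvScan_snd : ∀ (l : List Char) (b : ℕ) (s : Bool),
    (pvScan l b s).2 = (s || pvShopWords.any (fun w => PySem.Chars.isIn w.toList l)) := by
  intro l
  induction l with
  | nil =>
      intro b s
      simp [pvScan, pvShopWords, pvIsIn_nil]
  | cons c cs ih =>
      intro b s
      simp only [pvScan, ih]
      rw [Bool.eq_iff_iff]
      simp only [pvShopWords, List.any_cons, List.any_nil, pvIsIn_cons, Bool.or_eq_true,
        Bool.or_false]
      tauto

-- B's scan: best is the min over b and the ranks of keywords that occur somewhere in l
theorem pvScan_fst : ∀ (l : List Char) (b : ℕ) (s : Bool),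
    (pvScan l b s).1
      = pvKeyRank.foldl (fun a x => if PySem.Chars.isIn x.1.toList l then min a x.2 else a) b := by
  intro l
  induction l with
  | nil =>
      intro b s
      simp [pvScan, pvKeyRank, pvIsIn_nil]
  | cons c cs ih =>
      intro b s
      simp only [pvScan, ih, pvStep_eq, pvIsIn_cons]
      rw [pvFoldl_min_or (fun x => PySem.Chars.startswith (c :: cs) x.1.toList)
            (fun x => PySem.Chars.isIn x.1.toList cs)]

-- ===== VERDICT =====
theorem categorize_merchant_spec : Claim_equal_categorize_merchant := by
  intro title note _
  unfold Spec_categorize_merchant categorize_merchant categorize_merchant_alt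
  simp only [pvScan_fst, pvScan_snd, pvKeyRank_groups, List.foldl_append, pvFold_group,
    pvShopWords, List.any_cons, List.any_nil, Bool.false_or, Bool.or_false]
  generalize PySem.Chars.lower (title.toList ++ ' ' :: note.toList) = L
  generalize PySem.Chars.isIn "wine".toList L = b0
  generalize PySem.Chars.isIn "coffee".toList L = b1
  generalize PySem.Chars.isIn "cafe".toList L = b2
  generalize PySem.Chars.isIn "bakery".toList L = b3
  generalize PySem.Chars.isIn "deli".toList L = b4
  generalize PySem.Chars.isIn "patisserie".toList L = b5
  generalize PySem.Chars.isIn "brew".toList L = b6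
  generalize PySem.Chars.isIn "bar".toList L = b7
  generalize PySem.Chars.isIn "pub".toList L = b8
  generalize PySem.Chars.isIn "tavern".toList L = b9
  generalize PySem.Chars.isIn "bistro".toList L = b10
  generalize PySem.Chars.isIn "brasserie".toList L = b11
  generalize PySem.Chars.isIn "trattoria".toList L = b12
  generalize PySem.Chars.isIn "shop".toList L = s0
  generalize PySem.Chars.isIn "store".toList L = s1
  generalize PySem.Chars.isIn "merchant".toList L = s2
  generalize PySem.Chars.isIn "spirits".toList L = s3
  generalize PySem.Chars.isIn "liquor".toList L = s4
  generalize (b1 || b2) = C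
  generalize (b3 || (b4 || b5)) = K
  generalize (b7 || (b8 || b9)) = R
  generalize (b10 || (b11 || b12)) = S5
  generalize (s0 || (s1 || (s2 || (s3 || s4)))) = SH
  revert b0 C K b6 R S5 SH
  decide
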